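-- pv_equiv track=rewrite | github.com/Knowledge-Graph-Hub/kg-microbe | kg_microbe/transform_utils/bakta/utils.py | get_protein_id
-- ===== SOURCE A (Python) =====
-- from typing import Dict, List, Optional, Set, Tuple
--
-- def get_protein_id(annotations: Dict[str, List[str]], prefer_refseq: bool = True) -> Optional[str]:
--     """
--     Get the best protein identifier from annotations.
--
--     Strategy: Prefer RefSeq, fall back to UniRef50.
--
--     :param annotations: Dictionary of parsed annotations from parse_dbxrefs()
--     :param prefer_refseq: Whether to prefer RefSeq over UniRef (default: True)
--     :return: Protein ID string with prefix, or None if no protein ID found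
--     """
--     # Prefer RefSeq if available
--     if prefer_refseq and annotations.get("refseq"):
--         # Return first RefSeq ID with prefix
--         return f"RefSeq:{annotations['refseq'][0]}"
--
--     # Fall back to UniRef50 (most commonly used cluster level)
--     if annotations.get("uniref"):
--         # Find UniRef50 entry
--         for uniref_id in annotations["uniref"]:
--             if "UniRef50_" in uniref_id:
--                 return f"UniRef:{uniref_id}"
--
--         # If no UniRef50, use UniRef90
--         for uniref_id in annotations["uniref"]:
--             if "UniRef90_" in uniref_id:
--                 return f"UniRef:{uniref_id}"
--
--         # Last resort: use first UniRef entry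
--         return f"UniRef:{annotations['uniref'][0]}"
--
--     # No protein ID found
--     return None
-- ===== SOURCE B (Python) =====
-- def get_protein_id(annotations, prefer_refseq=True):
--     if prefer_refseq:
--         refs = annotations.get("refseq")
--         if refs:
--             return "RefSeq:" + refs[0]
--     unirefs = annotations.get("uniref")
--     if not unirefs:
--         return None
--     first90 = None
--     for uid in unirefs:
--         if "UniRef50_" in uid:
--             return "UniRef:" + uid
--         if first90 is None and "UniRef90_" in uid:
--             first90 = uid
--     return "UniRef:" + (first90 if first90 is not None else unirefs[0])
-- ===== Notes on version B (the rewrite author's own statement) =====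
-- stated objective: alternative
-- what changed: Replaces A's up-to-three sequential scans of the uniref list (find UniRef50, then find UniRef90, then fall back to element 0) by a single pass that returns at the first UniRef50 hit while remembering the first UniRef90 seen, falling back to the list head.
import Mathlib
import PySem

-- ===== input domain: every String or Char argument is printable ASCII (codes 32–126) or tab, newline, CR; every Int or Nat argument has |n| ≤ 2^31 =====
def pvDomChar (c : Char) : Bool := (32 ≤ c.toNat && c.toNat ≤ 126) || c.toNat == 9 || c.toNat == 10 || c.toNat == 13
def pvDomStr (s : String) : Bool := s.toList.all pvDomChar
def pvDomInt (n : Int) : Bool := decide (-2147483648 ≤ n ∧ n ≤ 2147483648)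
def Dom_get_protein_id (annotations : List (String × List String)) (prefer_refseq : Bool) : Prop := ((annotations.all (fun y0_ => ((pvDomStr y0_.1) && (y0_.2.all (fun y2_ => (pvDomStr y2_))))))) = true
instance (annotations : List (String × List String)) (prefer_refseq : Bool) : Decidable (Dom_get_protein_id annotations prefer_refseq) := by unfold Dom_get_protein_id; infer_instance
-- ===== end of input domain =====

-- B replaces A's up-to-three sequential scans of the uniref list by one pass
-- remembering the first UniRef90 seen (objective: alternative decomposition).

-- ===== PORT A =====
-- dict.get(k): first match on the association list (exact: Python dict keys are unique)
def pvGet? (l : List (String × List String)) (k : String) : Option (List String) :=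
  match l with
  | [] => none
  | (k', v) :: t => if k' = k then some v else pvGet? t k

-- 'for uniref_id in annotations["uniref"]: if sub in uniref_id: return ...' — one helper per loop shape
def pvFindSub (sub : String) : List String → Option String
  | [] => none
  | x :: xs => if PySem.Str.isIn sub x then some x else pvFindSub sub xs

def get_protein_id (annotations : List (String × List String)) (prefer_refseq : Bool) : Option String :=
  -- if prefer_refseq and annotations.get("refseq"):  (truthy = present and nonempty)
  match (if prefer_refseq then pvGet? annotations "refseq" else none) with
  | some (r :: _) => some ("RefSeq:" ++ r)
  | _ =>
    match pvGet? annotations "uniref" with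
    | some (u0 :: us) =>
      match pvFindSub "UniRef50_" (u0 :: us) with
      | some x => some ("UniRef:" ++ x)
      | none =>
        match pvFindSub "UniRef90_" (u0 :: us) with
        | some x => some ("UniRef:" ++ x)
        | none => some ("UniRef:" ++ u0)
    | _ => none

-- ===== PORT B =====
-- single pass: return at first 'UniRef50_' hit, remember first 'UniRef90_' hit
def pvOnePass (first90 : Option String) (first : String) : List String → String
  | [] => first90.getD first
  | u :: us =>
    if PySem.Str.isIn "UniRef50_" u then u
    else pvOnePass (if first90.isNone && PySem.Str.isIn "UniRef90_" u then some u else first90) first us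

-- 'if not unirefs: return None' — None and [] are both falsy, so match on .getD []
def pvUnirefFallback (annotations : List (String × List String)) : Option String :=
  match (pvGet? annotations "uniref").getD [] with
  | [] => none
  | u0 :: us => some ("UniRef:" ++ pvOnePass none u0 (u0 :: us))

def get_protein_id_alt (annotations : List (String × List String)) (prefer_refseq : Bool) : Option String :=
  if prefer_refseq then
    match (pvGet? annotations "refseq").getD [] with
    | r :: _ => some ("RefSeq:" ++ r)
    | [] => pvUnirefFallback annotations
  else pvUnirefFallback annotations

-- ===== PRECONDITION & SPEC =====
def Spec_get_protein_id (annotations : List (String × List String)) (prefer_refseq : Bool) (out : Option String) : Prop := out = get_protein_id_alt annotations prefer_refseq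
instance (annotations : List (String × List String)) (prefer_refseq : Bool) (out : Option String) : Decidable (Spec_get_protein_id annotations prefer_refseq out) := by unfold Spec_get_protein_id; infer_instance

-- ===== CLAIM (what is proved, stated in full; the proofs are below) =====
def Claim_equal_get_protein_id : Prop := ∀ (annotations : List (String × List String)) (prefer_refseq : Bool), Dom_get_protein_id annotations prefer_refseq → Spec_get_protein_id annotations prefer_refseq (get_protein_id annotations prefer_refseq)

-- ===== LEMMAS AND PROOFS =====

-- the one-pass loop computes: first 50-hit, else the remembered/first 90-hit, else the fallback element
theorem pvOnePass_eq (l : List String) : ∀ (f90 : Option String) (first : String),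
    pvOnePass f90 first l =
      match pvFindSub "UniRef50_" l with
      | some x => x
      | none =>
        match f90 with
        | some y => y
        | none =>
          match pvFindSub "UniRef90_" l with
          | some x => x
          | none => first := by
  induction l with
  | nil => intro f90 first; cases f90 <;> simp [pvOnePass, pvFindSub]
  | cons u us ih =>
    intro f90 first
    simp only [pvOnePass, pvFindSub]
    by_cases h50 : PySem.Str.isIn "UniRef50_" u
    · simp only [h50, if_true, ite_true]
    · simp only [h50, Bool.false_eq_true, if_false, ite_false, ih]
      cases f90 with
      | some y => simp
      | none =>
        by_cases h90 : PySem.Str.isIn "UniRef90_" u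
        · simp only [h90, Option.isNone_none, Bool.true_and, if_true]
        · simp only [h90, Bool.false_eq_true, Bool.and_false, if_false]

theorem pvUniref_eq (u0 : String) (us : List String) :
    (match pvFindSub "UniRef50_" (u0 :: us) with
     | some x => some ("UniRef:" ++ x)
     | none =>
       match pvFindSub "UniRef90_" (u0 :: us) with
       | some x => some ("UniRef:" ++ x)
       | none => some ("UniRef:" ++ u0)) = some ("UniRef:" ++ pvOnePass none u0 (u0 :: us)) := by
  rw [pvOnePass_eq]
  cases pvFindSub "UniRef50_" (u0 :: us) <;> cases pvFindSub "UniRef90_" (u0 :: us) <;> rfl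

theorem get_protein_id_eq_alt (annotations : List (String × List String)) (prefer_refseq : Bool) :
    get_protein_id annotations prefer_refseq = get_protein_id_alt annotations prefer_refseq := by
  unfold get_protein_id get_protein_id_alt pvUnirefFallback
  cases prefer_refseq with
  | false =>
    simp only [if_false, Bool.false_eq_true, ite_false]
    cases h : pvGet? annotations "uniref" with
    | none => rfl
    | some l =>
      cases l with
      | nil => rfl
      | cons u0 us => exact pvUniref_eq u0 us
  | true =>
    simp only [if_true, ite_true]
    cases hr : pvGet? annotations "refseq" with
    | some r =>
      cases r with
      | cons x xs => rfl
      | nil =>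
        cases h : pvGet? annotations "uniref" with
        | none => rfl
        | some l =>
          cases l with
          | nil => rfl
          | cons u0 us => exact pvUniref_eq u0 us
    | none =>
      cases h : pvGet? annotations "uniref" with
      | none => rfl
      | some l =>
        cases l with
        | nil => rfl
        | cons u0 us => exact pvUniref_eq u0 us

-- ===== VERDICT (by name: the statement is the Claim_ definition above) =====
theorem get_protein_id_spec : Claim_equal_get_protein_id := by
  intro annotations prefer_refseq _
  exact get_protein_id_eq_alt annotations prefer_refseq
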